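-- pv_equiv track=rewrite | github.com/anatolyburtsev/advent-of-code | 2024/day3/main.py | filter_enables_muls
-- ===== SOURCE A (Python) =====
-- from typing import List
--
-- def filter_enables_muls(expressions: List[str]) -> List[str]:
--     is_enabled = True
--     result = []
--     for expr in expressions:
--         match expr:
--             case 'don\'t()':
--                 is_enabled = False
--             case 'do()':
--                 is_enabled = True
--             case _:
--                 if is_enabled:
--                     result.append(expr)
--     return result
-- ===== SOURCE B (Python) =====
-- from typing import List
--
-- def filter_enables_muls(expressions: List[str]) -> List[str]:
--     # Pass 1: record the toggle state at each position.
--     states = []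
--     flag = True
--     for expr in expressions:
--         if expr == "don't()":
--             flag = False
--         elif expr == 'do()':
--             flag = True
--         states.append(flag)
--     # Pass 2: select enabled expressions that are not marker strings.
--     return [e for e, s in zip(expressions, states)
--             if s and e != "don't()" and e != 'do()']
-- ===== Notes on version B (the rewrite author's own statement) =====
-- stated objective: alternative
-- what changed: Replaces the single interleaved loop (toggle flag + conditional append) with two separate passes: first build a parallel list of per-position toggle states, then select expressions by zipping with that state table and filtering out the two marker strings.
import Mathlib
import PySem

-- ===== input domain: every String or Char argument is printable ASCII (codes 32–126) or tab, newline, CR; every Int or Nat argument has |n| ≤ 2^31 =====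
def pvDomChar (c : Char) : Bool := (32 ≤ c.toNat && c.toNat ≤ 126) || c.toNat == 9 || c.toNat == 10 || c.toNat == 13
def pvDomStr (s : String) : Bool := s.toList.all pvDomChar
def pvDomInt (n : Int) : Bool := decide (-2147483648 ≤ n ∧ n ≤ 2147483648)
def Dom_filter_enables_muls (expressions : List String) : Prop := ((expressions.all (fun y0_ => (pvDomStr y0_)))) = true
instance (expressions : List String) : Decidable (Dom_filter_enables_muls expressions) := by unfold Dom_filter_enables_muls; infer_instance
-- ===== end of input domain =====

-- B replaces A's single interleaved loop with a state-table pass followed by a selection pass (alternative decomposition, same cost).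

-- ===== PORT A =====
-- A: one loop carrying (is_enabled, result); markers flip the flag, other strings append when enabled.
def filter_enables_muls (expressions : List String) : List String :=
  (expressions.foldl
    (fun (st : Bool × List String) expr =>
      if expr = "don't()" then (false, st.2)
      else if expr = "do()" then (true, st.2)
      else if st.1 then (st.1, st.2 ++ [expr]) else st)
    (true, [])).2

-- ===== PORT B =====
-- B pass 1: build the parallel list of per-position toggle states (loop appends the updated flag).
def pvStates (expressions : List String) : List Bool :=
  (expressions.foldl
    (fun (st : Bool × List Bool) expr =>
      let flag := if expr = "don't()" then false else if expr = "do()" then true else st.1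
      (flag, st.2 ++ [flag]))
    (true, [])).2

-- B pass 2: zip with the states and keep enabled non-marker expressions.
def filter_enables_muls_alt (expressions : List String) : List String :=
  ((expressions.zip (pvStates expressions)).filter
    (fun p => p.2 && p.1 ≠ "don't()" && p.1 ≠ "do()")).map Prod.fst

-- ===== PRECONDITION & SPEC =====
def Spec_filter_enables_muls (expressions : List String) (out : List String) : Prop := out = filter_enables_muls_alt expressions
instance (expressions : List String) (out : List String) : Decidable (Spec_filter_enables_muls expressions out) := by unfold Spec_filter_enables_muls; infer_instance

-- ===== CLAIM (what is proved, stated in full; the proofs are below) =====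
def Claim_equal_filter_enables_muls : Prop := ∀ (expressions : List String), Dom_filter_enables_muls expressions → Spec_filter_enables_muls expressions (filter_enables_muls expressions)

-- ===== LEMMAS AND PROOFS =====

-- recursive characterisation of A's loop result from an arbitrary flag
def aGo (b : Bool) : List String → List String
  | [] => []
  | x :: xs =>
    if x = "don't()" then aGo false xs
    else if x = "do()" then aGo true xs
    else if b then x :: aGo b xs else aGo b xs

-- recursive characterisation of B's state list from an arbitrary flag
def sGo (b : Bool) : List String → List Bool
  | [] => []
  | x :: xs =>
    let f := if x = "don't()" then false else if x = "do()" then true else b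
    f :: sGo f xs

theorem foldlA_eq (b : Bool) (acc : List String) (xs : List String) :
    (xs.foldl
      (fun (st : Bool × List String) expr =>
        if expr = "don't()" then (false, st.2)
        else if expr = "do()" then (true, st.2)
        else if st.1 then (st.1, st.2 ++ [expr]) else st)
      (b, acc)).2 = acc ++ aGo b xs := by
  induction xs generalizing b acc with
  | nil => simp [aGo]
  | cons x xs ih =>
    simp only [List.foldl_cons, aGo]
    by_cases h1 : x = "don't()"
    · simp [h1, ih]
    · by_cases h2 : x = "do()"
      · simp [h2, ih]
      · cases b <;> simp [h1, h2, ih]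

theorem foldlS_eq (b : Bool) (acc : List Bool) (xs : List String) :
    (xs.foldl
      (fun (st : Bool × List Bool) expr =>
        let flag := if expr = "don't()" then false else if expr = "do()" then true else st.1
        (flag, st.2 ++ [flag]))
      (b, acc)).2 = acc ++ sGo b xs := by
  induction xs generalizing b acc with
  | nil => simp [sGo]
  | cons x xs ih =>
    rw [List.foldl_cons]
    refine (ih _ _).trans ?_
    by_cases h1 : x = "don't()"
    · simp [sGo, h1]
    · by_cases h2 : x = "do()" <;> simp [sGo, h1, h2]

theorem aGo_eq_filter (b : Bool) (xs : List String) :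
    aGo b xs = ((xs.zip (sGo b xs)).filter
      (fun p => p.2 && p.1 ≠ "don't()" && p.1 ≠ "do()")).map Prod.fst := by
  induction xs generalizing b with
  | nil => simp [aGo, sGo]
  | cons x xs ih =>
    simp only [aGo, sGo, List.zip_cons_cons, List.filter_cons]
    by_cases h1 : x = "don't()"
    · simp [h1, ih]
    · by_cases h2 : x = "do()"
      · simp [h2, ih]
      · cases b <;> simp [h1, h2, ih]

-- ===== VERDICT (by name: the statement is the Claim_ definition above) =====
theorem filter_enables_muls_spec : Claim_equal_filter_enables_muls := by
  intro expressions _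
  unfold Spec_filter_enables_muls filter_enables_muls filter_enables_muls_alt pvStates
  rw [foldlA_eq, foldlS_eq]
  simpa using aGo_eq_filter true expressions
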